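-- pv_equiv track=rewrite | github.com/vincent0426/testing-pdogs | week5/HW2.py | mono_inc_plus
-- ===== SOURCE A (Python) =====
-- def mono_inc_plus(inlist, k=3):
--     final_list = []
--     ans = []
--     temp = []
--     ans.append(0)
--     temp.append(inlist[0])
--     for i in range(1, len(inlist)):
--         if inlist[i] > temp[-1]:
--             temp.append(inlist[i])
--             if i == len(inlist) - 1 and len(temp) > k:
--                 ans.append(i)
--                 final_list.append(ans)
--                 ans = []
--         else:
--             if len(temp) > k:
--                 ans.append(i-1)
--                 final_list.append(ans)
--                 ans = []
--                 ans.append(i)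
--                 temp.clear()
--                 temp.append(inlist[i])
--             else:
--                 ans[0] = i
--                 temp.clear()
--                 temp.append(inlist[i])
--     return final_list
-- ===== SOURCE B (Python) =====
-- def mono_inc_plus(inlist, k=3):
--     # One pass collecting maximal strictly-increasing runs as (start, end) index
--     # pairs, then a comprehension keeps runs with more than k elements.
--     runs = []
--     start = 0
--     for i in range(1, len(inlist)):
--         if inlist[i] <= inlist[i - 1]:
--             runs.append((start, i - 1))
--             start = i
--     if inlist:
--         runs.append((start, len(inlist) - 1))
--     return [[s, e] for (s, e) in runs if e - s + 1 > k]
-- ===== Notes on version B (the rewrite author's own statement) =====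
-- stated objective: simpler
-- what changed: B first collects maximal strictly-increasing runs as (start,end) index pairs in one scan (tracking only the run start, no temp value list), then filters runs with more than k elements in a comprehension, instead of A's interleaved state machine that mixes run tracking, filtering and output in one loop.
-- intended difference: When k < 1 and the final element does not extend an increasing run (single-element list, or last element <= its predecessor), A drops the terminal one-element run while B returns it as [n-1,n-1]; a one-element run is longer than k<1, so B's value is the intended one. — e.g. on mono_inc_plus([2, 1], 0): A returns [[0, 0]], B returns [[0, 0], [1, 1]]
import Mathlib
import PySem

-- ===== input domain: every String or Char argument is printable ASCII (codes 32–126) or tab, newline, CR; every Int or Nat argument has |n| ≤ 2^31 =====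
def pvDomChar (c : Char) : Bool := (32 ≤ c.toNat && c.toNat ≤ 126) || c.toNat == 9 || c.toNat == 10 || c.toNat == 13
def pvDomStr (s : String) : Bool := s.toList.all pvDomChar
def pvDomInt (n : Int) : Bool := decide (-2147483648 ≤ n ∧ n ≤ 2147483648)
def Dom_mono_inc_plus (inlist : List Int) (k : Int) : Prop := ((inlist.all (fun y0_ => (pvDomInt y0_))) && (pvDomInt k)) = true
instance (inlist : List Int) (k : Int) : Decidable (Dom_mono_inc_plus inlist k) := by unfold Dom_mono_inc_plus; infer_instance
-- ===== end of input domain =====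

-- B collects maximal strictly-increasing runs as (start,end) index pairs in one scan, then
-- filters runs with more than k elements — simpler than A's interleaved state machine.

-- ===== PORT A =====
-- loop body of A's `for i in range(1, len(inlist))`; state = (final_list, ans, temp)
def stepA (inlist : List Int) (k : Int) (n : Nat)
    (st : List (List Int) × List Int × List Int) (i : Nat) :
    List (List Int) × List Int × List Int :=
  let x := inlist.getD i 0          -- inlist[i] (i always in range here)
  if x > st.2.2.getLastD 0 then     -- inlist[i] > temp[-1] (temp never empty)
    let temp := st.2.2 ++ [x]
    if i = n - 1 ∧ (temp.length : Int) > k then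
      (st.1 ++ [st.2.1 ++ [(i : Int)]], [], temp)
    else
      (st.1, st.2.1, temp)
  else
    if (st.2.2.length : Int) > k then
      (st.1 ++ [st.2.1 ++ [(i : Int) - 1]], [(i : Int)], [x])
    else
      (st.1, st.2.1.set 0 (i : Int), [x])

def mono_inc_plus (inlist : List Int) (k : Int) : List (List Int) :=
  match inlist with
  | [] => []  -- Python raises IndexError on `inlist[0]` here; excluded by Pre_
  | x0 :: _ =>
    ((List.range' 1 (inlist.length - 1)).foldl (stepA inlist k inlist.length)
      ([], [(0 : Int)], [x0])).1

-- ===== PORT B =====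
-- loop body of B's scan; state = (runs, start)
def stepB (inlist : List Int) (st : List (Nat × Nat) × Nat) (i : Nat) :
    List (Nat × Nat) × Nat :=
  if inlist.getD i 0 ≤ inlist.getD (i - 1) 0 then (st.1 ++ [(st.2, i - 1)], i) else st

def mono_inc_plus_alt (inlist : List Int) (k : Int) : List (List Int) :=
  let n := inlist.length
  let st := (List.range' 1 (n - 1)).foldl (stepB inlist) ([], 0)
  let runs := if inlist.isEmpty then st.1 else st.1 ++ [(st.2, n - 1)]
  (runs.filter (fun se => (se.2 : Int) - (se.1 : Int) + 1 > k)).map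
    (fun se => [(se.1 : Int), (se.2 : Int)])

-- ===== PRECONDITION & SPEC =====
-- Pre_ excludes only the empty list, on which A raises IndexError.
def Pre_mono_inc_plus (inlist : List Int) (k : Int) : Prop := inlist ≠ []
instance (inlist : List Int) (k : Int) : Decidable (Pre_mono_inc_plus inlist k) := by
  unfold Pre_mono_inc_plus; infer_instance

def pvWitness_mono_inc_plus : List Int × Int := ([1, 2, 3, 4, 1], 3)

-- When k < 1 and the final element does not extend an increasing run (single-element list, or
-- last element ≤ its predecessor), A drops the terminal one-element run while B returns it as
-- [n-1, n-1]; a one-element run is longer than k < 1, so B's value is the intended one.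
def D_mono_inc_plus (inlist : List Int) (k : Int) : Prop :=
  inlist ≠ [] ∧ k < 1 ∧
    (inlist.length = 1 ∨
      inlist.getD (inlist.length - 1) 0 ≤ inlist.getD (inlist.length - 2) 0)
instance (inlist : List Int) (k : Int) : Decidable (D_mono_inc_plus inlist k) := by
  unfold D_mono_inc_plus; infer_instance

def Spec_mono_inc_plus (inlist : List Int) (k : Int) (out : List (List Int)) : Prop :=
  ¬ D_mono_inc_plus inlist k → out = mono_inc_plus_alt inlist k
instance (inlist : List Int) (k : Int) (out : List (List Int)) : Decidable (Spec_mono_inc_plus inlist k out) := by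
  unfold Spec_mono_inc_plus; infer_instance

def pvDiffWitness_mono_inc_plus : List Int × Int := ([2, 1], 0)
def pvDiffWitnessOut_mono_inc_plus : (List (List Int)) × (List (List Int)) :=
  ([[0, 0]], [[0, 0], [1, 1]])

-- ===== CLAIM (what is proved, stated in full; the proofs are below) =====
def Claim_unchanged_mono_inc_plus : Prop := ∀ (inlist : List Int) (k : Int), Dom_mono_inc_plus inlist k → Pre_mono_inc_plus inlist k → Spec_mono_inc_plus inlist k (mono_inc_plus inlist k)
def Claim_changed_mono_inc_plus : Prop := Dom_mono_inc_plus (pvDiffWitness_mono_inc_plus.1) (pvDiffWitness_mono_inc_plus.2) ∧ Pre_mono_inc_plus (pvDiffWitness_mono_inc_plus.1) (pvDiffWitness_mono_inc_plus.2) ∧ D_mono_inc_plus (pvDiffWitness_mono_inc_plus.1) (pvDiffWitness_mono_inc_plus.2) ∧ mono_inc_plus (pvDiffWitness_mono_inc_plus.1) (pvDiffWitness_mono_inc_plus.2) = pvDiffWitnessOut_mono_inc_plus.1 ∧ mono_inc_plus_alt (pvDiffWitness_mono_inc_plus.1) (pvDiffWitness_mono_inc_plus.2) = pvDiffWitnessOut_mono_inc_plus.2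 ∧ pvDiffWitnessOut_mono_inc_plus.1 ≠ pvDiffWitnessOut_mono_inc_plus.2
def Claim_exact_mono_inc_plus : Prop := ∀ (inlist : List Int) (k : Int), Dom_mono_inc_plus inlist k → Pre_mono_inc_plus inlist k → D_mono_inc_plus inlist k → mono_inc_plus inlist k ≠ mono_inc_plus_alt inlist k
-- ===== LEMMAS AND PROOFS =====

-- B's filter-then-map postprocessing, as a function of the run list.
def fmapRuns (k : Int) (runs : List (Nat × Nat)) : List (List Int) :=
  (runs.filter (fun se => (se.2 : Int) - (se.1 : Int) + 1 > k)).map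
    (fun se => [(se.1 : Int), (se.2 : Int)])

theorem fmapRuns_append_single (k : Int) (runs : List (Nat × Nat)) (s e : Nat) :
    fmapRuns k (runs ++ [(s, e)]) =
      fmapRuns k runs ++
        (if (e : Int) - (s : Int) + 1 > k then [[(s : Int), (e : Int)]] else []) := by
  simp [fmapRuns, List.filter_append]
  split_ifs <;> simp <;> omega

-- Joint loop invariant after processing indices 1..j (all strictly before the last index).
theorem inv_lemma (inlist : List Int) (k : Int) (x0 : Int) (h0 : inlist.getD 0 0 = x0)
    (j : Nat) (hj : j + 2 ≤ inlist.length) :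
    ∃ runs start temp,
      (List.range' 1 j).foldl (stepB inlist) ([], 0) = (runs, start) ∧
      (List.range' 1 j).foldl (stepA inlist k inlist.length) ([], [(0 : Int)], [x0]) =
        (fmapRuns k runs, [(start : Int)], temp) ∧
      start ≤ j ∧ temp.getLastD 0 = inlist.getD j 0 ∧ temp.length = j + 1 - start := by
  induction j with
  | zero =>
    exact ⟨[], 0, [x0], rfl, by simp [fmapRuns], by omega, by simpa using h0.symm, by simp⟩
  | succ j ih =>
    obtain ⟨runs, start, temp, hB, hA, hs, hlast, hlen⟩ := ih (by omega)
    have hcons : List.range' 1 (j + 1) = List.range' 1 j ++ [j + 1] := by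
      simpa [Nat.add_comm] using List.range'_concat (s:=1) (n:=j) (step:=1)
    have hne : ¬ (j + 1 = inlist.length - 1) := by omega
    by_cases hcmp : inlist.getD (j + 1) 0 > temp.getLastD 0
    · -- increasing step
      refine ⟨runs, start, temp ++ [inlist.getD (j + 1) 0], ?_, ?_, by omega, by simp, ?_⟩
      · rw [hcons, List.foldl_append, hB]
        simp only [List.foldl_cons, List.foldl_nil, stepB]
        rw [if_neg (by simp only [Nat.add_sub_cancel]; rw [← hlast]; omega)]
      · rw [hcons, List.foldl_append, hA]
        simp only [List.foldl_cons, List.foldl_nil, stepA]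
        rw [if_pos hcmp, if_neg (by intro h; exact hne h.1)]
      · simp; omega
    · -- break step
      have hle : inlist.getD (j + 1) 0 ≤ inlist.getD ((j + 1) - 1) 0 := by
        simp only [Nat.add_sub_cancel]; rw [← hlast]; omega
      refine ⟨runs ++ [(start, j)], j + 1, [inlist.getD (j + 1) 0], ?_, ?_, le_refl _,
        by simp, by simp⟩
      · rw [hcons, List.foldl_append, hB]
        simp only [List.foldl_cons, List.foldl_nil, stepB]
        rw [if_pos hle]; simp
      · rw [hcons, List.foldl_append, hA]
        simp only [List.foldl_cons, List.foldl_nil, stepA]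
        rw [if_neg hcmp, fmapRuns_append_single]
        by_cases hk : (temp.length : Int) > k
        · rw [if_pos hk, if_pos (by omega)]
          simp
        · rw [if_neg hk, if_neg (by omega)]
          simp
-- Master relation: on nonempty input, B = A ++ (terminal singleton run iff A dropped it).
theorem fmapRuns_eq (k : Int) (runs : List (Nat × Nat)) :
    (runs.filter (fun se => (se.2 : Int) - (se.1 : Int) + 1 > k)).map
      (fun se => [(se.1 : Int), (se.2 : Int)]) = fmapRuns k runs := rfl

theorem main_rel (inlist : List Int) (k : Int) (hne : inlist ≠ []) :
    mono_inc_plus_alt inlist k =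
      mono_inc_plus inlist k ++
        (if k < 1 ∧ (inlist.length = 1 ∨
            inlist.getD (inlist.length - 1) 0 ≤ inlist.getD (inlist.length - 2) 0)
         then [[((inlist.length - 1 : Nat) : Int), ((inlist.length - 1 : Nat) : Int)]]
         else []) := by
  obtain ⟨x0, rest, rfl⟩ := List.exists_cons_of_ne_nil hne
  cases rest with
  | nil =>
      by_cases hk : k < 1 <;>
        simp [mono_inc_plus, mono_inc_plus_alt, hk] <;> omega
  | cons y rest' =>
      obtain ⟨runs, start, temp, hB, hA, hs, hlast, hlenT⟩ :=
        inv_lemma (x0 :: y :: rest') k x0 (by simp) rest'.length (by simp)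
      have hcons : List.range' 1 ((x0 :: y :: rest').length - 1)
          = List.range' 1 rest'.length ++ [rest'.length + 1] := by
        simp only [List.length_cons]
        simpa [Nat.add_comm] using
          List.range'_concat (s:=1) (n:=rest'.length) (step:=1)
      have htl : (temp.length : Int) = (rest'.length : Int) - (start : Int) + 1 := by
        rw [hlenT]; omega
      simp only [mono_inc_plus, mono_inc_plus_alt, List.isEmpty_cons, Bool.false_eq_true,
        if_false, hcons, List.foldl_append, hA, hB, List.foldl_cons, List.foldl_nil]
      have hlen1 : (x0 :: y :: rest').length - 1 = rest'.length + 1 := by simp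
      have hlen2 : (x0 :: y :: rest').length - 2 = rest'.length := by simp
      have hlenne : ¬ (x0 :: y :: rest').length = 1 := by simp
      by_cases hcmp : (x0 :: y :: rest').getD (rest'.length + 1) 0 >
          (x0 :: y :: rest').getD rest'.length 0
      · -- final step increasing: terminal run emitted by A iff long enough; D-condition false
        rw [stepB, if_neg (by rw [Nat.add_sub_cancel]; exact not_le.mpr hcmp), stepA]
        simp only [hlast]
        rw [if_pos hcmp]
        have hdneg : ¬ (k < 1 ∧ ((x0 :: y :: rest').length = 1 ∨
            (x0 :: y :: rest').getD (rest'.length + 1) 0 ≤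
              (x0 :: y :: rest').getD ((x0 :: y :: rest').length - 2) 0)) := by
          rintro ⟨-, h | h⟩
          · exact hlenne h
          · rw [hlen2] at h; omega
        by_cases hk2 :
            ((temp ++ [(x0 :: y :: rest').getD (rest'.length + 1) 0]).length : Int) > k
        · rw [if_pos ⟨hlen1.symm, hk2⟩]
          simp only [List.length_append, List.length_cons, List.length_nil] at hk2
          rw [fmapRuns_eq, hlen1, fmapRuns_append_single,
            if_pos (by push_cast; omega), if_neg hdneg]
          simp only [List.append_nil, List.cons_append, List.nil_append]
        · rw [if_neg (fun h => hk2 h.2)]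
          simp only [List.length_append, List.length_cons, List.length_nil] at hk2
          rw [fmapRuns_eq, hlen1, fmapRuns_append_single,
            if_neg (by push_cast; omega), if_neg hdneg]
      · -- final step non-increasing: A drops the terminal singleton, B keeps it iff k < 1
        rw [stepB, if_pos (by rw [Nat.add_sub_cancel]; exact not_lt.mp hcmp), stepA]
        simp only [hlast]
        rw [if_neg hcmp]
        have hdpos : (k < 1) → (k < 1 ∧ ((x0 :: y :: rest').length = 1 ∨
            (x0 :: y :: rest').getD (rest'.length + 1) 0 ≤
              (x0 :: y :: rest').getD ((x0 :: y :: rest').length - 2) 0)) := by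
          intro hk1
          exact ⟨hk1, Or.inr (by rw [hlen2]; exact not_lt.mp hcmp)⟩
        by_cases hk2 : (temp.length : Int) > k
        · rw [if_pos hk2]
          rw [fmapRuns_eq, hlen1, Nat.add_sub_cancel, fmapRuns_append_single,
            fmapRuns_append_single, if_pos (by omega : (rest'.length : Int) - start + 1 > k)]
          by_cases hk1 : k < 1
          · rw [if_pos (by push_cast; omega), if_pos (hdpos hk1)]
            simp
          · rw [if_neg (by push_cast; omega), if_neg (fun h => hk1 h.1)]
            simp
        · rw [if_neg hk2]
          rw [fmapRuns_eq, hlen1, Nat.add_sub_cancel, fmapRuns_append_single,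
            fmapRuns_append_single, if_neg (by omega : ¬ (rest'.length : Int) - start + 1 > k)]
          by_cases hk1 : k < 1
          · rw [if_pos (by push_cast; omega), if_pos (hdpos hk1)]
            simp
          · rw [if_neg (by push_cast; omega), if_neg (fun h => hk1 h.1)]
            simp

theorem ne_append_singleton (l : List (List Int)) (x : List Int) : l ≠ l ++ [x] := by
  intro h
  have := congrArg List.length h
  simp at this

-- ===== VERDICT (by name: the statement is the Claim_ definition above) =====
theorem mono_inc_plus_spec : Claim_unchanged_mono_inc_plus := by
  intro inlist k _ hpre hnd
  have h := main_rel inlist k hpre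
  rw [if_neg (fun hc => hnd ⟨hpre, hc⟩)] at h
  simpa using h.symm

theorem mono_inc_plus_changed : Claim_changed_mono_inc_plus := by
  unfold Claim_changed_mono_inc_plus; decide

theorem mono_inc_plus_tight : Claim_exact_mono_inc_plus := by
  intro inlist k _ hpre hd heq
  have := main_rel inlist k hpre
  obtain ⟨h1, h2, h3⟩ := hd
  rw [if_pos ⟨h2, h3⟩] at this
  rw [← heq] at this
  exact ne_append_singleton _ _ this
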